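-- pv_equiv track=rewrite | github.com/miliar/Code_Jam_Webscraper | solutions_python/Problem_193/27.py | solve
-- ===== SOURCE A (Python) =====
-- from itertools import product, combinations, permutations
--
-- def can_cover(N, workers, know):
--     res = set()
--     options = product(range(N), repeat=len(workers))
--     for o in options:
--         if all(know[workers[i]][o[i]] == "1" for i in range(len(o))):
--             if len(set(o)) == len(o):
--                 res.add(tuple(sorted(list(o))))
--     return res
--
-- def is_ok2(N, after):
--     for i in range(N + 1):
--         for w1 in combinations(range(N), i):
--             w2 = tuple(sorted(list(set(range(N)) - set(w1))))
--             cc1 = can_cover(N, w1, after)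
--             cc2 = can_cover(N, w2, after)
--             for c in cc1:
--                 c2 = tuple(sorted(list(set(range(N)) - set(c))))
--                 if c2 not in cc2:
--                     return False
--     return True
--
-- def solve(N, knowledge):
--     positions = list(product(range(N), repeat=2))
--     for i in range(N):
--         for j in range(N):
--             if knowledge[i][j] == "1":
--                 positions.remove((i, j))
--     for dollars in range(N**2 + 1):
--         for selected in combinations(positions, dollars):
--             nk = [list(know) for know in knowledge]
--             for i, j in selected:
--                 nk[i][j] = "1"
--             if is_ok2(N, nk):
--                 return dollars
-- ===== SOURCE B (Python) =====
-- from itertools import combinations, permutations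
--
-- def can_cover(N, workers, know):
--     # subset enumeration + matching search instead of flat product enumeration
--     res = set()
--     k = len(workers)
--     for cols in combinations(range(N), k):
--         if any(all(know[workers[i]][p[i]] == "1" for i in range(k))
--                for p in permutations(cols)):
--             res.add(cols)
--     return res
--
-- def is_ok2(N, after):
--     cols = range(N)
--     for k in range(N + 1):
--         for w1 in combinations(cols, k):
--             w2 = tuple(c for c in cols if c not in w1)
--             cc2 = can_cover(N, w2, after)
--             if any(tuple(c for c in cols if c not in c1) not in cc2
--                    for c1 in can_cover(N, w1, after)):
--                 return False
--     return True
--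
-- def _apply(knowledge, selected):
--     nk = [list(row) for row in knowledge]
--     for i, j in selected:
--         nk[i][j] = "1"
--     return nk
--
-- def solve(N, knowledge):
--     positions = [(i, j) for i in range(N) for j in range(N)
--                  if knowledge[i][j] != "1"]
--     for dollars in range(N ** 2 + 1):
--         if any(is_ok2(N, _apply(knowledge, selected))
--                for selected in combinations(positions, dollars)):
--             return dollars
-- ===== Notes on version B (the rewrite author's own statement) =====
-- stated objective: alternative
-- what changed: can_cover now enumerates size-k column subsets and keeps a subset iff a permutation-matching search finds a worker-to-column assignment (instead of filtering the flat N^k product by the all-distinct test and sorting each tuple), and the zero-cell position list is built by a comprehension instead of product()+list.remove.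
import Mathlib
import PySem

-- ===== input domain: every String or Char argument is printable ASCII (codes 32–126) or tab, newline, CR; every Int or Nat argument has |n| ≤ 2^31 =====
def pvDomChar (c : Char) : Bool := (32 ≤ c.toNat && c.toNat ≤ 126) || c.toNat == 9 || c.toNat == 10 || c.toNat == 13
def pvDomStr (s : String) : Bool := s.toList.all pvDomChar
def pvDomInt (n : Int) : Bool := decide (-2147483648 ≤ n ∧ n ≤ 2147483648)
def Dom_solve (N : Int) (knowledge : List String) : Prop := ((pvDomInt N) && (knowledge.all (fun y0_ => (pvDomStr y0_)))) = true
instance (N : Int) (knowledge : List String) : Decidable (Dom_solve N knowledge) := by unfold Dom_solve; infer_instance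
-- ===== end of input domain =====

-- B replaces A's can_cover (flat N^k product enumeration filtered by injectivity) by
-- enumeration of size-k column subsets each tested by a permutation-matching search,
-- and builds the zero-cell position list by a comprehension instead of product+remove;
-- objective: alternative (same result, different traversal), no speed claim.

-- ===== PORT A =====
-- shared helper: the generator expression 'all(know[workers[i]][o[i]] == "1" for i in range(len(o)))',
-- which appears verbatim in A's can_cover and in B's can_cover
def edgeOk (know : List (List Char)) (workers : List Int) (o : List Int) : Bool :=
  (List.range o.length).all fun i =>
    ((PySem.List.pyGet? workers (i : Int)).bind fun w =>
     (PySem.List.pyGet? o (i : Int)).bind fun c =>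
     (PySem.List.pyGet? know w).bind fun row =>
     PySem.List.pyGet? row c) == some '1'

-- product(range(N), repeat=k)
def pyProdRep (N : Int) (k : Nat) : List (List Int) :=
  match k with
  | 0 => [[]]
  | k + 1 => (PySem.List.pyRange 0 N 1).flatMap fun x => (pyProdRep N k).map (x :: ·)

-- A's can_cover
def canCoverA (N : Int) (workers : List Int) (know : List (List Char)) : PySem.Set (List Int) :=
  (pyProdRep N workers.length).foldl
    (fun res o =>
      if edgeOk know workers o && ((PySem.Set.ofList o).length == o.length)
      then PySem.Set.add res (PySem.List.sorted o (fun x => x))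
      else res)
    []

-- tuple(sorted(list(set(range(N)) - set(s))))
def complementA (N : Int) (s : List Int) : List Int :=
  PySem.List.sorted
    (PySem.Set.diff (PySem.Set.ofList (PySem.List.pyRange 0 N 1)) (PySem.Set.ofList s))
    (fun x => x)

-- A's is_ok2 (early 'return False' ported as the Bool 'all' over the loop ranges)
def isOk2A (N : Int) (after : List (List Char)) : Bool :=
  (PySem.List.pyRange 0 (N + 1) 1).all fun i =>
    (PySem.List.combinations (PySem.List.pyRange 0 N 1) i.toNat).all fun w1 =>
      let cc1 := canCoverA N w1 after
      let cc2 := canCoverA N (complementA N w1) after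
      cc1.all fun c => cc2.contains (complementA N c)

-- shared helper: 'nk = [list(know) for know in knowledge]; for i, j in selected: nk[i][j] = "1"',
-- which appears verbatim in A's solve and in B's _apply
def setCell (nk : List (List Char)) (p : Int × Int) : List (List Char) :=
  match (PySem.List.pyGet? nk p.1).bind (fun row => PySem.List.pySet? row p.2 '1') with
  | some row' => (PySem.List.pySet? nk p.1 row').getD nk   -- Python raises outside Pre_; unreachable there
  | none => nk

def applySel (knowledge : List String) (selected : List (Int × Int)) : List (List Char) :=
  selected.foldl setCell (knowledge.map (·.toList))

-- A's positions: list(product(range(N), repeat=2)) then .remove of every '1' cell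
def positionsA (N : Int) (knowledge : List String) : List (Int × Int) :=
  let init := (PySem.List.pyRange 0 N 1).flatMap fun i =>
    (PySem.List.pyRange 0 N 1).map fun j => (i, j)
  (PySem.List.pyRange 0 N 1).foldl (fun pos i =>
    (PySem.List.pyRange 0 N 1).foldl (fun pos j =>
      if ((PySem.List.pyGet? knowledge i).bind fun row => PySem.Str.pyGet? row j) == some '1'
      then (PySem.List.remove? pos (i, j)).getD pos   -- ValueError impossible: each pair occurs once
      else pos) pos) init

-- 'for dollars in range(N**2 + 1)': the counter loop, one step per dollars value
def dollarsLoopA (N : Int) (knowledge : List String) (positions : List (Int × Int)) :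
    Nat → Int → Option Int
  | 0, _ => none
  | fuel + 1, dollars =>
    if (PySem.List.combinations positions dollars.toNat).any fun selected =>
         isOk2A N (applySel knowledge selected)
    then some dollars
    else dollarsLoopA N knowledge positions fuel (dollars + 1)

def solve (N : Int) (knowledge : List String) : Int :=
  (dollarsLoopA N knowledge (positionsA N knowledge) (N * N + 1).toNat 0).getD 0
  -- Python returns None if the loop exhausts; inside Pre_ it never does

-- ===== PORT B =====
-- B's can_cover: combinations of columns, each subset kept iff some permutation matches
def canCoverB (N : Int) (workers : List Int) (know : List (List Char)) : PySem.Set (List Int) :=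
  (PySem.List.combinations (PySem.List.pyRange 0 N 1) workers.length).foldl
    (fun res cols =>
      if (PySem.List.permutations cols cols.length).any fun p => edgeOk know workers p
      then PySem.Set.add res cols
      else res)
    []

-- tuple(c for c in cols if c not in s)
def complementB (N : Int) (s : List Int) : List Int :=
  (PySem.List.pyRange 0 N 1).filter fun c => !s.contains c

-- B's is_ok2
def isOk2B (N : Int) (after : List (List Char)) : Bool :=
  (PySem.List.pyRange 0 (N + 1) 1).all fun k =>
    (PySem.List.combinations (PySem.List.pyRange 0 N 1) k.toNat).all fun w1 =>
      let cc2 := canCoverB N (complementB N w1) after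
      !((canCoverB N w1 after).any fun c1 => !cc2.contains (complementB N c1))

-- 'for dollars in range(N**2 + 1)': the counter loop, one step per dollars value
def dollarsLoopB (N : Int) (knowledge : List String) (positions : List (Int × Int)) :
    Nat → Int → Option Int
  | 0, _ => none
  | fuel + 1, dollars =>
    if (PySem.List.combinations positions dollars.toNat).any fun selected =>
         isOk2B N (applySel knowledge selected)
    then some dollars
    else dollarsLoopB N knowledge positions fuel (dollars + 1)

def solve_alt (N : Int) (knowledge : List String) : Int :=
  let positions := (PySem.List.pyRange 0 N 1).flatMap fun i =>
    ((PySem.List.pyRange 0 N 1).filter fun j =>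
       !(((PySem.List.pyGet? knowledge i).bind fun row => PySem.Str.pyGet? row j) == some '1')).map
      fun j => (i, j)
  (dollarsLoopB N knowledge positions (N * N + 1).toNat 0).getD 0
  -- Python returns None if the loop exhausts; inside Pre_ it never does

-- ===== PRECONDITION & SPEC =====
-- Pre_ excludes exactly the inputs where A raises IndexError: N rows are required,
-- each of length at least N (for N ≤ 0 nothing is required and A returns 0).
def Pre_solve (N : Int) (knowledge : List String) : Prop :=
  N ≤ (knowledge.length : Int) ∧ ∀ row ∈ knowledge.take N.toNat, N ≤ PySem.Str.len row
instance (N : Int) (knowledge : List String) : Decidable (Pre_solve N knowledge) := by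
  unfold Pre_solve; infer_instance
def pvWitness_solve : Int × List String := (1, ["0"])

def Spec_solve (N : Int) (knowledge : List String) (out : Int) : Prop := out = solve_alt N knowledge
instance (N : Int) (knowledge : List String) (out : Int) : Decidable (Spec_solve N knowledge out) := by unfold Spec_solve; infer_instance

-- ===== CLAIM (what is proved, stated in full; the proofs are below) =====
def Claim_equal_solve : Prop := ∀ (N : Int) (knowledge : List String), Dom_solve N knowledge → Pre_solve N knowledge → Spec_solve N knowledge (solve N knowledge)

-- ===== LEMMAS AND PROOFS =====

-- membership through the 'if … : res.add(g o)' accumulation loop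
theorem mem_foldl_addif {β α : Type} [BEq α] [LawfulBEq α] (f : β → Bool) (g : β → α) :
    ∀ (l : List β) (acc : PySem.Set α) (c : α),
      (c ∈ l.foldl (fun res o => if f o then PySem.Set.add res (g o) else res) acc ↔
        c ∈ acc ∨ ∃ o ∈ l, f o = true ∧ g o = c) := by
  intro l
  induction l with
  | nil => simp
  | cons x t ih =>
    intro acc c
    rw [List.foldl_cons, ih]
    by_cases hf : f x = true
    · rw [if_pos hf, PySem.Set.mem_add]
      constructor
      · rintro ((h | h) | ⟨o, ho, h1, h2⟩)
        · exact Or.inl h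
        · exact Or.inr ⟨x, List.mem_cons_self, hf, h.symm⟩
        · exact Or.inr ⟨o, List.mem_cons_of_mem _ ho, h1, h2⟩
      · rintro (h | ⟨o, ho, h1, h2⟩)
        · exact Or.inl (Or.inl h)
        · rcases List.mem_cons.mp ho with rfl | ho'
          · exact Or.inl (Or.inr h2.symm)
          · exact Or.inr ⟨o, ho', h1, h2⟩
    · rw [if_neg hf]
      constructor
      · rintro (h | ⟨o, ho, h1, h2⟩)
        · exact Or.inl h
        · exact Or.inr ⟨o, List.mem_cons_of_mem _ ho, h1, h2⟩
      · rintro (h | ⟨o, ho, h1, h2⟩)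
        · exact Or.inl h
        · rcases List.mem_cons.mp ho with rfl | ho'
          · exact absurd h1 hf
          · exact Or.inr ⟨o, ho', h1, h2⟩

theorem mem_pyProdRep (N : Int) : ∀ (k : Nat) (o : List Int),
    o ∈ pyProdRep N k ↔ o.length = k ∧ ∀ x ∈ o, 0 ≤ x ∧ x < N := by
  intro k
  induction k with
  | zero =>
    intro o
    simp [pyProdRep, List.length_eq_zero_iff]
    rintro rfl; simp
  | succ k ih =>
    intro o
    simp only [pyProdRep, List.mem_flatMap, List.mem_map, PySem.List.mem_pyRange_one]
    constructor
    · rintro ⟨x, hx, t, ht, rfl⟩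
      rcases (ih t).mp ht with ⟨hl, hmem⟩
      refine ⟨by simp [hl], ?_⟩
      intro y hy
      rcases List.mem_cons.mp hy with rfl | hy'
      · exact hx
      · exact hmem y hy'
    · rintro ⟨hl, hmem⟩
      cases o with
      | nil => simp at hl
      | cons x t =>
        refine ⟨x, hmem x List.mem_cons_self, t, (ih t).mpr ⟨by simpa using hl, ?_⟩, rfl⟩
        exact fun y hy => hmem y (List.mem_cons_of_mem _ hy)

-- set(o) keeps a subsequence of o (first occurrences in order)
theorem ofList_sublist {α : Type} [BEq α] [LawfulBEq α] (xs : List α) :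
    (PySem.Set.ofList xs).Sublist xs := by
  induction xs using List.reverseRecOn with
  | nil => simp [PySem.Set.ofList_nil]
  | append_singleton t x ih =>
    rw [PySem.Set.ofList_append_singleton, PySem.Set.add_eq_ite]
    split
    · exact ih.trans (List.sublist_append_left t [x])
    · exact List.Sublist.append ih (List.Sublist.refl [x])

-- A's distinctness test 'len(set(o)) == len(o)' is exactly Nodup
theorem ofList_len_beq {α : Type} [BEq α] [LawfulBEq α] (o : List α) :
    (((PySem.Set.ofList o).length == o.length) = true) ↔ o.Nodup := by
  rw [beq_iff_eq]
  constructor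
  · intro h
    have := (ofList_sublist o).eq_of_length h
    rw [← this]; exact PySem.Set.nodup_ofList o
  · intro h
    rw [PySem.Set.ofList_eq_self_of_nodup o h]

-- unfold PySem.List.permutations one step (definitional)
theorem permutations_succ {α : Type} (xs : List α) (r : Nat) :
    PySem.List.permutations xs (r + 1) =
      (List.range xs.length).flatMap fun i =>
        match xs[i]? with
        | none => []
        | some x => (PySem.List.permutations (xs.eraseIdx i) r).map (x :: ·) := rfl

-- converse of PySem.List.perm_of_mem_permutations
theorem mem_permutations_of_perm {α : Type} :
    ∀ (p xs : List α), p.Perm xs → p ∈ PySem.List.permutations xs xs.length := by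
  intro p
  induction p with
  | nil =>
    intro xs h
    rw [List.Perm.eq_nil h.symm]
    simp [PySem.List.permutations_zero]
  | cons a t ih =>
    intro xs h
    have hlen : xs.length = t.length + 1 := by
      have := h.length_eq; simpa using this.symm
    have ha : a ∈ xs := h.mem_iff.mp List.mem_cons_self
    rcases List.mem_iff_getElem.mp ha with ⟨i, hi, hxi⟩
    rw [hlen, permutations_succ]
    rw [List.mem_flatMap]
    refine ⟨i, by simpa [hlen] using List.mem_range.mpr hi, ?_⟩
    rw [List.getElem?_eq_getElem hi, hxi]
    simp only [List.mem_map]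
    refine ⟨t, ?_, rfl⟩
    have hperm : t.Perm (xs.eraseIdx i) := by
      have h2 : xs.Perm (a :: xs.eraseIdx i) := by
        have := (List.getElem_cons_eraseIdx_perm hi).symm
        rwa [hxi] at this
      exact (List.perm_cons a).mp (h.trans h2)
    have hlen2 : (xs.eraseIdx i).length = t.length := by
      rw [List.length_eraseIdx_of_lt hi, hlen]; simp
    rw [← hlen2]
    exact ih _ hperm

-- a strictly increasing list of members of a strictly increasing list is a sublist of it
theorem sublist_of_pairwise_lt_subset :
    ∀ (l₂ l₁ : List Int), l₂.Pairwise (· < ·) → l₁.Pairwise (· < ·) →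
      (∀ x ∈ l₁, x ∈ l₂) → l₁.Sublist l₂ := by
  intro l₂
  induction l₂ with
  | nil =>
    intro l₁ _ _ hs
    cases l₁ with
    | nil => exact List.Sublist.refl []
    | cons a t => exact absurd (hs a List.mem_cons_self) (List.not_mem_nil)
  | cons b t₂ ih =>
    intro l₁ h2 h1 hs
    rcases List.pairwise_cons.mp h2 with ⟨hb, ht₂⟩
    cases l₁ with
    | nil => exact List.nil_sublist _
    | cons a t₁ =>
      rcases List.pairwise_cons.mp h1 with ⟨hat, ht₁⟩
      rcases List.mem_cons.mp (hs a List.mem_cons_self) with rfl | hat₂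
      · refine List.Sublist.cons₂ a (ih t₁ ht₂ ht₁ ?_)
        intro x hx
        rcases List.mem_cons.mp (hs x (List.mem_cons_of_mem _ hx)) with rfl | hx₂
        · exact absurd (hat x hx) (lt_irrefl x)
        · exact hx₂
      · refine List.Sublist.cons b (ih (a :: t₁) ht₂ h1 ?_)
        intro x hx
        have hba : b < a := hb a hat₂
        have hbx : b < x := by
          rcases List.mem_cons.mp hx with rfl | hx'
          · exact hba
          · exact hba.trans (hat x hx')
        rcases List.mem_cons.mp (hs x hx) with rfl | hx₂
        · exact absurd hbx (lt_irrefl x)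
        · exact hx₂

theorem mem_canCoverA (N : Int) (w : List Int) (know : List (List Char)) (c : List Int) :
    c ∈ canCoverA N w know ↔
      ∃ o, (o.length = w.length ∧ ∀ x ∈ o, 0 ≤ x ∧ x < N) ∧ edgeOk know w o = true ∧
        o.Nodup ∧ PySem.List.sorted o (fun x => x) = c := by
  unfold canCoverA
  rw [mem_foldl_addif]
  simp only [List.not_mem_nil, false_or]
  constructor
  · rintro ⟨o, ho, hf, rfl⟩
    rcases Bool.and_eq_true_iff.mp hf with ⟨he, hn⟩
    exact ⟨o, (mem_pyProdRep N _ o).mp ho, he, (ofList_len_beq o).mp hn, rfl⟩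
  · rintro ⟨o, hp, he, hn, rfl⟩
    exact ⟨o, (mem_pyProdRep N _ o).mpr hp, Bool.and_eq_true_iff.mpr ⟨he, (ofList_len_beq o).mpr hn⟩, rfl⟩

theorem mem_canCoverB (N : Int) (w : List Int) (know : List (List Char)) (c : List Int) :
    c ∈ canCoverB N w know ↔
      (c.Sublist (PySem.List.pyRange 0 N 1) ∧ c.length = w.length) ∧
        ∃ p, p.Perm c ∧ edgeOk know w p = true := by
  unfold canCoverB
  rw [mem_foldl_addif]
  simp only [List.not_mem_nil, false_or]
  constructor
  · rintro ⟨cols, hc, hany, rfl⟩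
    rcases List.any_eq_true.mp hany with ⟨p, hp, he⟩
    exact ⟨(PySem.List.mem_combinations_iff _ _ _).mp hc,
      p, PySem.List.perm_of_mem_permutations hp, he⟩
  · rintro ⟨hc, p, hp, he⟩
    exact ⟨c, (PySem.List.mem_combinations_iff _ _ _).mpr hc,
      List.any_eq_true.mpr ⟨p, mem_permutations_of_perm p c hp, he⟩, rfl⟩

theorem canCover_mem_iff (N : Int) (w : List Int) (know : List (List Char)) (c : List Int) :
    c ∈ canCoverA N w know ↔ c ∈ canCoverB N w know := by
  rw [mem_canCoverA, mem_canCoverB]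
  constructor
  · rintro ⟨o, ⟨hlen, hbnd⟩, he, hnd, rfl⟩
    have hperm : (PySem.List.sorted o (fun x => x)).Perm o := PySem.List.sorted_perm o _ _
    have hmem : ∀ x, x ∈ PySem.List.sorted o (fun x => x) ↔ x ∈ o := fun x =>
      PySem.List.mem_sorted o _ _ x
    have hnd' : (PySem.List.sorted o (fun x => x)).Nodup := hperm.nodup_iff.mpr hnd
    have hle : (PySem.List.sorted o (fun x => x)).Pairwise (· ≤ ·) := by
      have := PySem.List.sorted_pairwise o (fun x => x)
      simpa using this
    have hlt : (PySem.List.sorted o (fun x => x)).Pairwise (· < ·) := by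
      have := hle.and hnd'
      exact this.imp (fun hab => lt_of_le_of_ne hab.1 hab.2)
    refine ⟨⟨?_, ?_⟩, o, hperm.symm, he⟩
    · refine sublist_of_pairwise_lt_subset _ _ (PySem.List.pairwise_lt_pyRange_one 0 N) hlt ?_
      intro x hx
      rcases hbnd x ((hmem x).mp hx) with ⟨h0, h1⟩
      exact PySem.List.mem_pyRange_one.mpr ⟨h0, h1⟩
    · rw [hperm.length_eq, hlen]
  · rintro ⟨⟨hsub, hlen⟩, p, hp, he⟩
    have hltc : c.Pairwise (· < ·) := List.Pairwise.sublist hsub (PySem.List.pairwise_lt_pyRange_one 0 N)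
    have hndc : c.Nodup := hltc.imp (fun hab => ne_of_lt hab)
    refine ⟨p, ⟨by rw [hp.length_eq, hlen], ?_⟩, he, hp.nodup_iff.mpr hndc, ?_⟩
    · intro x hx
      have hxc : x ∈ c := hp.mem_iff.mp hx
      exact PySem.List.mem_pyRange_one.mp (List.Sublist.mem hxc hsub)
    · exact PySem.List.sorted_eq_of_perm_of_pairwise_lt p c _ hp.symm (by simpa using hltc)

theorem complement_eq (N : Int) (s : List Int) : complementA N s = complementB N s := by
  unfold complementA complementB PySem.Set.diff
  rw [PySem.Set.ofList_eq_self_of_nodup _ (PySem.List.nodup_pyRange_one 0 N)]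
  have hcong : ∀ x ∈ PySem.List.pyRange 0 N 1,
      (!(PySem.Set.ofList s).contains x) = (!s.contains x) := by
    intro x _
    by_cases hx : x ∈ s
    · simp [hx, (PySem.Set.mem_ofList s x).mpr hx]
    · have hns : x ∉ PySem.Set.ofList s := fun hc => hx ((PySem.Set.mem_ofList s x).mp hc)
      simp [hx, hns]
  rw [List.filter_congr hcong]
  apply PySem.List.sorted_eq_self_of_pairwise
  have hlt : ((PySem.List.pyRange 0 N 1).filter (fun x => !s.contains x)).Pairwise (· < ·) :=
    (PySem.List.pairwise_lt_pyRange_one 0 N).filter _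
  exact hlt.imp le_of_lt

theorem all_congr_mem_iff {α : Type} (l₁ l₂ : List α) (p : α → Bool)
    (h : ∀ x, x ∈ l₁ ↔ x ∈ l₂) : l₁.all p = l₂.all p := by
  by_cases hb : l₂.all p = true
  · rw [hb]
    rw [List.all_eq_true] at hb ⊢
    exact fun x hx => hb x ((h x).mp hx)
  · have h1 : ¬ l₁.all p = true := fun hc =>
      hb (List.all_eq_true.mpr fun x hx => List.all_eq_true.mp hc x ((h x).mpr hx))
    rw [Bool.not_eq_true] at hb h1
    rw [hb, h1]

theorem contains_congr_mem_iff {α : Type} [BEq α] [LawfulBEq α] (l₁ l₂ : List α) (x : α)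
    (h : ∀ y, y ∈ l₁ ↔ y ∈ l₂) : l₁.contains x = l₂.contains x := by
  by_cases hx : x ∈ l₂
  · simp [hx, (h x).mpr hx]
  · have h1 : x ∉ l₁ := fun hc => hx ((h x).mp hc)
    simp [hx, h1]

theorem all_congr_mem {α : Type} (l : List α) (p q : α → Bool)
    (h : ∀ x ∈ l, p x = q x) : l.all p = l.all q := by
  induction l with
  | nil => rfl
  | cons a t ih =>
    simp only [List.all_cons, h a List.mem_cons_self,
      ih (fun x hx => h x (List.mem_cons_of_mem _ hx))]

theorem isOk2_eq (N : Int) (after : List (List Char)) : isOk2A N after = isOk2B N after := by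
  unfold isOk2A isOk2B
  apply all_congr_mem
  intro i _
  apply all_congr_mem
  intro w1 _
  dsimp only
  rw [← List.all_eq_not_any_not]
  rw [complement_eq]
  have hin : ∀ c,
      ((canCoverA N (complementB N w1) after).contains (complementA N c)) =
        ((canCoverB N (complementB N w1) after).contains (complementB N c)) := by
    intro c
    rw [complement_eq]
    exact contains_congr_mem_iff _ _ _ (fun y => canCover_mem_iff N _ after y)
  rw [all_congr_mem _ _ _ (fun c _ => hin c)]
  exact all_congr_mem_iff _ _ _ (fun y => canCover_mem_iff N w1 after y)

theorem remove_getD_eq_erase {α : Type} [BEq α] [LawfulBEq α] (l : List α) (x : α) :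
    (PySem.List.remove? l x).getD l = l.erase x := by
  by_cases hx : x ∈ l
  · rw [PySem.List.remove?_eq_some_erase l x hx]; rfl
  · rw [(PySem.List.remove?_eq_none_iff l x).mpr hx, Option.getD_none, List.erase_of_not_mem hx]

theorem foldl_eraseif {α : Type} [BEq α] [LawfulBEq α] (one : α → Bool) :
    ∀ (P l : List α), l.Nodup →
      P.foldl (fun acc x => if one x then acc.erase x else acc) l =
        l.filter (fun x => !(one x && P.contains x)) := by
  intro P
  induction P with
  | nil =>
    intro l _
    simp
  | cons p P ih =>
    intro l hnd
    rw [List.foldl_cons]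
    by_cases hp : one p = true
    · rw [if_pos hp, ih (l.erase p) (hnd.erase p), List.Nodup.erase_eq_filter hnd p,
        List.filter_filter]
      apply List.filter_congr
      intro x _
      by_cases hxp : x = p
      · subst hxp; simp [hp]
      · simp [show (x == p) = false from beq_eq_false_iff_ne.mpr hxp]
        exact fun _ => hxp
    · rw [if_neg hp, ih l hnd]
      apply List.filter_congr
      intro x _
      by_cases hxp : x = p
      · subst hxp; simp [Bool.not_eq_true] at hp; simp [hp]
      · simp [show (x == p) = false from beq_eq_false_iff_ne.mpr hxp]

theorem nested_foldl {α β γ : Type} (g : γ → α × β → γ) (l1 : List α) (l2 : List β) (init : γ) :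
    l1.foldl (fun acc i => l2.foldl (fun acc j => g acc (i, j)) acc) init =
      (l1.flatMap fun i => l2.map fun j => (i, j)).foldl g init := by
  rw [List.foldl_flatMap]
  simp [List.foldl_map]

theorem nodup_pairs (N : Int) :
    ((PySem.List.pyRange 0 N 1).flatMap fun i =>
      (PySem.List.pyRange 0 N 1).map fun j => (i, j)).Nodup := by
  have h : ((PySem.List.pyRange 0 N 1).flatMap fun i =>
      (PySem.List.pyRange 0 N 1).map fun j => (i, j)) =
      (PySem.List.pyRange 0 N 1) ×ˢ (PySem.List.pyRange 0 N 1) := rfl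
  rw [h]
  exact List.Nodup.product (PySem.List.nodup_pyRange_one 0 N) (PySem.List.nodup_pyRange_one 0 N)

theorem positions_eq (N : Int) (knowledge : List String) :
    positionsA N knowledge =
      (PySem.List.pyRange 0 N 1).flatMap fun i =>
        ((PySem.List.pyRange 0 N 1).filter fun j =>
           !(((PySem.List.pyGet? knowledge i).bind fun row => PySem.Str.pyGet? row j) == some '1')).map
          fun j => (i, j) := by
  unfold positionsA
  simp only [remove_getD_eq_erase]
  rw [nested_foldl (g := fun (acc : List (Int × Int)) (x : Int × Int) =>
    if ((PySem.List.pyGet? knowledge x.1).bind fun row => PySem.Str.pyGet? row x.2) == some '1'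
    then acc.erase x else acc)]
  rw [foldl_eraseif _ _ _ (nodup_pairs N)]
  rw [List.filter_congr (q := fun x : Int × Int =>
      !(((PySem.List.pyGet? knowledge x.1).bind fun row => PySem.Str.pyGet? row x.2) == some '1'))
    ?_]
  · rw [List.filter_flatMap]
    congr 1
    funext i
    rw [List.filter_map]
    rfl
  · intro x hx
    have hc : ((PySem.List.pyRange 0 N 1).flatMap fun i =>
        (PySem.List.pyRange 0 N 1).map fun j => (i, j)).contains x = true :=
      List.elem_eq_true_of_mem hx
    rw [hc, Bool.and_true]

theorem dollarsLoop_eq (N : Int) (knowledge : List String) (positions : List (Int × Int)) :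
    ∀ (fuel : Nat) (dollars : Int),
      dollarsLoopA N knowledge positions fuel dollars =
        dollarsLoopB N knowledge positions fuel dollars := by
  intro fuel
  induction fuel with
  | zero => intro _; rfl
  | succ fuel ih =>
    intro dollars
    unfold dollarsLoopA dollarsLoopB
    simp only [isOk2_eq, ih]

-- ===== VERDICT (by name: the statement is the Claim_ definition above) =====
theorem solve_spec : Claim_equal_solve := by
  intro N knowledge _ _
  unfold Spec_solve solve solve_alt
  rw [positions_eq, dollarsLoop_eq]
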